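-- pv_equiv track=rewrite | github.com/GIDR-AI/docs | scripts/generate_documentation.py | categorize_testcase
-- ===== SOURCE A (Python) =====
-- def categorize_testcase(tc):
--     """Improved categorization"""
--     name = (tc.get("name") or "").lower()
--     objective = (tc.get("objective") or "").lower()
--     text = f"{name} {objective}".lower()
--
--     # Authentication & Onboarding
--     if any(word in text for word in ["sign in", "signin", "login", "log in", "sign-in"]):
--         if "invalid" in text or "error" in text:
--             return ("authentication", "signing-in", "error-cases")
--         elif "forgot password" in text or "reset password" in text or "change password" in text:
--             return ("authentication", "signing-in", "password-management")
--         else: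
--             return ("authentication", "signing-in")
--     elif any(word in text for word in ["sign up", "signup", "register", "registration", "sign-up"]):
--         if "invalid" in text or "error" in text:
--             return ("authentication", "signing-up", "error-cases")
--         else:
--             return ("authentication", "signing-up")
--     elif "landing page" in text or ("landing" in text and "page" in text):
--         return ("authentication", "landing-page")
--     elif "logout" in text:
--         return ("authentication", "signing-in", "logout")
--
--     # Organizations and Teams
--     elif any(word in text for word in ["create team", "create a team", "team creation"]):
--         return ("organizations", "create-team")
--     elif "member profile" in text or ("profile" in text and "member" in text):
--         return ("organizations", "member-profile")
--     elif "organization settings" in text or "org settings" in text: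
--         return ("organizations", "organization-settings")
--     elif "invite member" in text or ("invite" in text and "member" in text):
--         return ("organizations", "invite-members")
--
--     # GIDRs (top level)
--     elif "analytics" in text:
--         return ("gidrs", "analytics")
--     elif "mcp server" in text or ("mcp" in text and "server" in text):
--         return ("gidrs", "mcp-server")
--     elif "language selection" in text or ("language" in text and ("change" in text or "select" in text)):
--         return ("gidrs", "language-selection")
--     elif "create gidr" in text:
--         return ("gidrs", "create-gidr")
--     elif "members" in text and "gidr" in text:
--         return ("gidrs", "members")
--
--     # GIDR Info
--     elif "gidr info" in text or "info popup" in text: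
--         return ("gidr", "info", "gidr-info")
--     elif "general settings" in text or "settings drawer" in text:
--         return ("gidr", "info", "general-settings")
--
--     # Prompts
--     elif "prompt" in text:
--         return ("gidr", "prompts")
--
--     # Ingestion Settings
--     elif "data source" in text or "data sources" in text:
--         if "file" in text:
--             return ("gidr", "ingestion-settings", "data-sources", "files")
--         elif "url" in text:
--             return ("gidr", "ingestion-settings", "data-sources", "urls")
--         elif "connector" in text:
--             return ("gidr", "ingestion-settings", "data-sources", "connectors")
--         elif "database" in text:
--             return ("gidr", "ingestion-settings", "data-sources", "database")
--         else:
--             return ("gidr", "ingestion-settings", "data-sources")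
--     elif "file" in text and ("upload" in text or "ingest" in text or "chunk" in text):
--         return ("gidr", "ingestion-settings", "data-sources", "files")
--     elif "url" in text and ("add" in text or "ingest" in text):
--         return ("gidr", "ingestion-settings", "data-sources", "urls")
--     elif "connector" in text:
--         return ("gidr", "ingestion-settings", "data-sources", "connectors")
--     elif "database" in text:
--         return ("gidr", "ingestion-settings", "data-sources", "database")
--     elif "tag" in text:
--         return ("gidr", "ingestion-settings", "tags")
--
--     # Design
--     elif "gidget" in text or "gidgets library" in text:
--         return ("gidr", "design", "gidgets-library")
--     elif "studio" in text:
--         return ("gidr", "design", "studio")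
--
--     # Workflows
--     elif "workflow" in text or "work flow" in text:
--         if "node" in text:
--             return ("gidr", "workflows", "nodes")
--         else:
--             return ("gidr", "workflows")
--     elif "node" in text and ("react" in text or "flow" in text):
--         return ("gidr", "workflows", "nodes")
--
--     # Default
--     return ("uncategorized",)
-- ===== SOURCE B (Python) =====
-- # Two-stage re-implementation: a single left-to-right scan of the text collects the set
-- # of keyword phrases present (no substring `in` tests, no predicates), then the category
-- # is chosen by interpreting a purely declarative rule table (CNF over keywords) against
-- # that set; nested sub-cases are flattened into earlier, more specific rules.
--
-- # Every keyword phrase any rule mentions.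
-- _KEYWORDS = [
--     "sign in", "signin", "login", "log in", "sign-in",
--     "invalid", "error",
--     "forgot password", "reset password", "change password",
--     "sign up", "signup", "register", "registration", "sign-up",
--     "landing", "page", "logout",
--     "create team", "create a team", "team creation",
--     "profile", "member",
--     "organization settings", "org settings",
--     "invite",
--     "analytics", "mcp", "server",
--     "language", "change", "select",
--     "create gidr", "members", "gidr",
--     "gidr info", "info popup",
--     "general settings", "settings drawer",
--     "prompt",
--     "data source", "file", "url", "connector", "database",
--     "upload", "ingest", "chunk", "add",
--     "tag", "gidget", "studio",
--     "workflow", "work flow", "node", "react", "flow",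
-- ]
--
-- # Ordered rules: each is (clauses, category); a rule fires when every clause has at
-- # least one of its keywords in the found set.  Sub-cases of A's nested branches appear
-- # as earlier, more specific rules; keywords implied by a longer phrase are dropped
-- # (e.g. "data sources" implies "data source", "landing page" implies both words).
-- _RULES = [
--     ([["sign in", "signin", "login", "log in", "sign-in"], ["invalid", "error"]],
--      ("authentication", "signing-in", "error-cases")),
--     ([["sign in", "signin", "login", "log in", "sign-in"],
--       ["forgot password", "reset password", "change password"]],
--      ("authentication", "signing-in", "password-management")),
--     ([["sign in", "signin", "login", "log in", "sign-in"]],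
--      ("authentication", "signing-in")),
--     ([["sign up", "signup", "register", "registration", "sign-up"], ["invalid", "error"]],
--      ("authentication", "signing-up", "error-cases")),
--     ([["sign up", "signup", "register", "registration", "sign-up"]],
--      ("authentication", "signing-up")),
--     ([["landing"], ["page"]], ("authentication", "landing-page")),
--     ([["logout"]], ("authentication", "signing-in", "logout")),
--     ([["create team", "create a team", "team creation"]], ("organizations", "create-team")),
--     ([["profile"], ["member"]], ("organizations", "member-profile")),
--     ([["organization settings", "org settings"]], ("organizations", "organization-settings")),
--     ([["invite"], ["member"]], ("organizations", "invite-members")),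
--     ([["analytics"]], ("gidrs", "analytics")),
--     ([["mcp"], ["server"]], ("gidrs", "mcp-server")),
--     ([["language"], ["change", "select"]], ("gidrs", "language-selection")),
--     ([["create gidr"]], ("gidrs", "create-gidr")),
--     ([["members"], ["gidr"]], ("gidrs", "members")),
--     ([["gidr info", "info popup"]], ("gidr", "info", "gidr-info")),
--     ([["general settings", "settings drawer"]], ("gidr", "info", "general-settings")),
--     ([["prompt"]], ("gidr", "prompts")),
--     ([["data source"], ["file"]], ("gidr", "ingestion-settings", "data-sources", "files")),
--     ([["data source"], ["url"]], ("gidr", "ingestion-settings", "data-sources", "urls")),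
--     ([["data source"], ["connector"]], ("gidr", "ingestion-settings", "data-sources", "connectors")),
--     ([["data source"], ["database"]], ("gidr", "ingestion-settings", "data-sources", "database")),
--     ([["data source"]], ("gidr", "ingestion-settings", "data-sources")),
--     ([["file"], ["upload", "ingest", "chunk"]],
--      ("gidr", "ingestion-settings", "data-sources", "files")),
--     ([["url"], ["add", "ingest"]], ("gidr", "ingestion-settings", "data-sources", "urls")),
--     ([["connector"]], ("gidr", "ingestion-settings", "data-sources", "connectors")),
--     ([["database"]], ("gidr", "ingestion-settings", "data-sources", "database")),
--     ([["tag"]], ("gidr", "ingestion-settings", "tags")),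
--     ([["gidget"]], ("gidr", "design", "gidgets-library")),
--     ([["studio"]], ("gidr", "design", "studio")),
--     ([["workflow", "work flow"], ["node"]], ("gidr", "workflows", "nodes")),
--     ([["workflow", "work flow"]], ("gidr", "workflows")),
--     ([["node"], ["react", "flow"]], ("gidr", "workflows", "nodes")),
-- ]
--
--
-- def categorize_testcase(tc):
--     name = (tc.get("name") or "").lower()
--     objective = (tc.get("objective") or "").lower()
--     text = f"{name} {objective}".lower()
--     # Stage 1: one scan over the text, recording every keyword that starts at each position.
--     found = set()
--     for i in range(len(text)):
--         for kw in _KEYWORDS: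
--             if kw not in found and text.startswith(kw, i):
--                 found.add(kw)
--     # Stage 2: interpret the rule table against the found set.
--     for clauses, category in _RULES:
--         if all(any(kw in found for kw in clause) for clause in clauses):
--             return category
--     return ("uncategorized",)
-- ===== Notes on version B (the rewrite author's own statement) =====
-- stated objective: alternative
-- what changed: Replaces the 30-branch if/elif cascade of repeated substring tests by a two-stage algorithm: a single left-to-right scan of the text builds the set of keyword phrases present (using startswith at each position, no substring `in` tests), and the category is then chosen by interpreting a purely declarative CNF rule table against that set, with A's nested sub-cases flattened into earlier more-specific rules and tests made redundant by a longer phrase dropped.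
import Mathlib
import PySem

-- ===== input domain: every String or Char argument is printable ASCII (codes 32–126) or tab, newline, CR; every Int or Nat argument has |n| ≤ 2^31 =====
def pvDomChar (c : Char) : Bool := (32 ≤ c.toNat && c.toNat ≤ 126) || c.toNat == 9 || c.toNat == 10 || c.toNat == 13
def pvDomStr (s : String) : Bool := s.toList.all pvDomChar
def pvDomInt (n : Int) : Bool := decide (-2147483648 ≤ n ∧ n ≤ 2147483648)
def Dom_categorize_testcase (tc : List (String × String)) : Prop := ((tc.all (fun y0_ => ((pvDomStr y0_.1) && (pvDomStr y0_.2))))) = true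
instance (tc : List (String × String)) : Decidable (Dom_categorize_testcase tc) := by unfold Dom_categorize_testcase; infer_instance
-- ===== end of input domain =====

-- B replaces A's keyword-cascade by a two-stage algorithm: a single left-to-right scan of
-- the text collects the set of keyword phrases present, then a declarative CNF rule table
-- is interpreted against that set (objective: alternative; same return value everywhere).

-- shared input parsing (identical first lines of both Pythons): "w in text"
def pvHas (w : String) (t : List Char) : Bool := PySem.Chars.isIn w.toList t

-- name/objective extraction and text = f"{name} {objective}".lower()
def pvText (tc : List (String × String)) : List Char :=
  let name := PySem.Chars.lower (((PySem.Dict.ofList tc).getD "name" "").toList)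
  let objective := PySem.Chars.lower (((PySem.Dict.ofList tc).getD "objective" "").toList)
  PySem.Chars.lower (name ++ ' ' :: objective)

-- ===== PORT A =====
def pvCatA (t : List Char) : List String :=
  if pvHas "sign in" t || pvHas "signin" t || pvHas "login" t || pvHas "log in" t || pvHas "sign-in" t then
    if pvHas "invalid" t || pvHas "error" t then ["authentication","signing-in","error-cases"]
    else if pvHas "forgot password" t || pvHas "reset password" t || pvHas "change password" t then ["authentication","signing-in","password-management"]
    else ["authentication","signing-in"]
  else if pvHas "sign up" t || pvHas "signup" t || pvHas "register" t || pvHas "registration" t || pvHas "sign-up" t then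
    if pvHas "invalid" t || pvHas "error" t then ["authentication","signing-up","error-cases"]
    else ["authentication","signing-up"]
  else if pvHas "landing page" t || (pvHas "landing" t && pvHas "page" t) then ["authentication","landing-page"]
  else if pvHas "logout" t then ["authentication","signing-in","logout"]
  else if pvHas "create team" t || pvHas "create a team" t || pvHas "team creation" t then ["organizations","create-team"]
  else if pvHas "member profile" t || (pvHas "profile" t && pvHas "member" t) then ["organizations","member-profile"]
  else if pvHas "organization settings" t || pvHas "org settings" t then ["organizations","organization-settings"]
  else if pvHas "invite member" t || (pvHas "invite" t && pvHas "member" t) then ["organizations","invite-members"]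
  else if pvHas "analytics" t then ["gidrs","analytics"]
  else if pvHas "mcp server" t || (pvHas "mcp" t && pvHas "server" t) then ["gidrs","mcp-server"]
  else if pvHas "language selection" t || (pvHas "language" t && (pvHas "change" t || pvHas "select" t)) then ["gidrs","language-selection"]
  else if pvHas "create gidr" t then ["gidrs","create-gidr"]
  else if pvHas "members" t && pvHas "gidr" t then ["gidrs","members"]
  else if pvHas "gidr info" t || pvHas "info popup" t then ["gidr","info","gidr-info"]
  else if pvHas "general settings" t || pvHas "settings drawer" t then ["gidr","info","general-settings"]
  else if pvHas "prompt" t then ["gidr","prompts"]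
  else if pvHas "data source" t || pvHas "data sources" t then
    if pvHas "file" t then ["gidr","ingestion-settings","data-sources","files"]
    else if pvHas "url" t then ["gidr","ingestion-settings","data-sources","urls"]
    else if pvHas "connector" t then ["gidr","ingestion-settings","data-sources","connectors"]
    else if pvHas "database" t then ["gidr","ingestion-settings","data-sources","database"]
    else ["gidr","ingestion-settings","data-sources"]
  else if pvHas "file" t && (pvHas "upload" t || pvHas "ingest" t || pvHas "chunk" t) then ["gidr","ingestion-settings","data-sources","files"]
  else if pvHas "url" t && (pvHas "add" t || pvHas "ingest" t) then ["gidr","ingestion-settings","data-sources","urls"]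
  else if pvHas "connector" t then ["gidr","ingestion-settings","data-sources","connectors"]
  else if pvHas "database" t then ["gidr","ingestion-settings","data-sources","database"]
  else if pvHas "tag" t then ["gidr","ingestion-settings","tags"]
  else if pvHas "gidget" t || pvHas "gidgets library" t then ["gidr","design","gidgets-library"]
  else if pvHas "studio" t then ["gidr","design","studio"]
  else if pvHas "workflow" t || pvHas "work flow" t then
    if pvHas "node" t then ["gidr","workflows","nodes"] else ["gidr","workflows"]
  else if pvHas "node" t && (pvHas "react" t || pvHas "flow" t) then ["gidr","workflows","nodes"]
  else ["uncategorized"]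

def categorize_testcase (tc : List (String × String)) : List String := pvCatA (pvText tc)

-- ===== PORT B =====
def pvKeywords : List String :=
  ["sign in", "signin", "login", "log in", "sign-in", "invalid", "error", "forgot password", "reset password", "change password", "sign up", "signup", "register", "registration", "sign-up", "landing", "page", "logout", "create team", "create a team", "team creation", "profile", "member", "organization settings", "org settings", "invite", "analytics", "mcp", "server", "language", "change", "select", "create gidr", "members", "gidr", "gidr info", "info popup", "general settings", "settings drawer", "prompt", "data source", "file", "url", "connector", "database", "upload", "ingest", "chunk", "add", "tag", "gidget", "studio", "workflow", "work flow", "node", "react", "flow"]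

def pvRules : List (List (List String) × List String) :=
  [ ([["sign in", "signin", "login", "log in", "sign-in"], ["invalid", "error"]], ["authentication", "signing-in", "error-cases"]),
    ([["sign in", "signin", "login", "log in", "sign-in"], ["forgot password", "reset password", "change password"]], ["authentication", "signing-in", "password-management"]),
    ([["sign in", "signin", "login", "log in", "sign-in"]], ["authentication", "signing-in"]),
    ([["sign up", "signup", "register", "registration", "sign-up"], ["invalid", "error"]], ["authentication", "signing-up", "error-cases"]),
    ([["sign up", "signup", "register", "registration", "sign-up"]], ["authentication", "signing-up"]),
    ([["landing"], ["page"]], ["authentication", "landing-page"]),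
    ([["logout"]], ["authentication", "signing-in", "logout"]),
    ([["create team", "create a team", "team creation"]], ["organizations", "create-team"]),
    ([["profile"], ["member"]], ["organizations", "member-profile"]),
    ([["organization settings", "org settings"]], ["organizations", "organization-settings"]),
    ([["invite"], ["member"]], ["organizations", "invite-members"]),
    ([["analytics"]], ["gidrs", "analytics"]),
    ([["mcp"], ["server"]], ["gidrs", "mcp-server"]),
    ([["language"], ["change", "select"]], ["gidrs", "language-selection"]),
    ([["create gidr"]], ["gidrs", "create-gidr"]),
    ([["members"], ["gidr"]], ["gidrs", "members"]),
    ([["gidr info", "info popup"]], ["gidr", "info", "gidr-info"]),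
    ([["general settings", "settings drawer"]], ["gidr", "info", "general-settings"]),
    ([["prompt"]], ["gidr", "prompts"]),
    ([["data source"], ["file"]], ["gidr", "ingestion-settings", "data-sources", "files"]),
    ([["data source"], ["url"]], ["gidr", "ingestion-settings", "data-sources", "urls"]),
    ([["data source"], ["connector"]], ["gidr", "ingestion-settings", "data-sources", "connectors"]),
    ([["data source"], ["database"]], ["gidr", "ingestion-settings", "data-sources", "database"]),
    ([["data source"]], ["gidr", "ingestion-settings", "data-sources"]),
    ([["file"], ["upload", "ingest", "chunk"]], ["gidr", "ingestion-settings", "data-sources", "files"]),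
    ([["url"], ["add", "ingest"]], ["gidr", "ingestion-settings", "data-sources", "urls"]),
    ([["connector"]], ["gidr", "ingestion-settings", "data-sources", "connectors"]),
    ([["database"]], ["gidr", "ingestion-settings", "data-sources", "database"]),
    ([["tag"]], ["gidr", "ingestion-settings", "tags"]),
    ([["gidget"]], ["gidr", "design", "gidgets-library"]),
    ([["studio"]], ["gidr", "design", "studio"]),
    ([["workflow", "work flow"], ["node"]], ["gidr", "workflows", "nodes"]),
    ([["workflow", "work flow"]], ["gidr", "workflows"]),
    ([["node"], ["react", "flow"]], ["gidr", "workflows", "nodes"]) ]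

-- Stage 1 of Source B: found = set(); for i in range(len(text)): for kw in _KEYWORDS: ...
-- text.startswith(kw, i) with 0 ≤ i < len(text) is exactly: kw.toList is a prefix of t.drop i.toNat
def pvScan (t : List Char) : PySem.Set String :=
  (PySem.List.pyRange 0 (t.length : Int) 1).foldl
    (fun found i => pvKeywords.foldl (fun fd kw =>
        if PySem.Set.contains fd kw then fd
        else if PySem.Chars.startswith (t.drop i.toNat) kw.toList then PySem.Set.add fd kw
        else fd) found)
    PySem.Set.empty

-- Stage 2 of Source B: first rule whose clauses all have a keyword in the found set
def pvEval (found : PySem.Set String) : List (List (List String) × List String) → List String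
  | [] => ["uncategorized"]
  | (clauses, cat) :: rest =>
    if clauses.all (fun cl => cl.any (fun kw => PySem.Set.contains found kw)) then cat
    else pvEval found rest

def categorize_testcase_alt (tc : List (String × String)) : List String :=
  pvEval (pvScan (pvText tc)) pvRules

-- ===== PRECONDITION & SPEC =====
def Spec_categorize_testcase (tc : List (String × String)) (out : List String) : Prop := out = categorize_testcase_alt tc
instance (tc : List (String × String)) (out : List String) : Decidable (Spec_categorize_testcase tc out) := by unfold Spec_categorize_testcase; infer_instance

-- ===== CLAIM (what is proved, stated in full; the proofs are below) =====
def Claim_equal_categorize_testcase : Prop := ∀ (tc : List (String × String)), Dom_categorize_testcase tc → Spec_categorize_testcase tc (categorize_testcase tc)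

-- ===== LEMMAS AND PROOFS =====
-- a substring test implied by a longer phrase: w ⊑ v and v in t give w in t
theorem pvHas_mono {w v : String} (h : w.toList <:+: v.toList) {t : List Char}
    (hv : pvHas v t = true) : pvHas w t = true := by
  simp only [pvHas, PySem.Chars.isIn_iff_infix] at *
  exact h.trans hv

-- the redundant alternatives A tests and B drops
theorem pv_eq_landing (t : List Char) :
    (pvHas "landing page" t || (pvHas "landing" t && pvHas "page" t)) = (pvHas "landing" t && pvHas "page" t) := by
  cases h : pvHas "landing page" t
  · simp
  · simp [pvHas_mono (w := "landing") (by decide) h, pvHas_mono (w := "page") (by decide) h]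

theorem pv_eq_profile (t : List Char) :
    (pvHas "member profile" t || (pvHas "profile" t && pvHas "member" t)) = (pvHas "profile" t && pvHas "member" t) := by
  cases h : pvHas "member profile" t
  · simp
  · simp [pvHas_mono (w := "profile") (by decide) h, pvHas_mono (w := "member") (by decide) h]

theorem pv_eq_invite (t : List Char) :
    (pvHas "invite member" t || (pvHas "invite" t && pvHas "member" t)) = (pvHas "invite" t && pvHas "member" t) := by
  cases h : pvHas "invite member" t
  · simp
  · simp [pvHas_mono (w := "invite") (by decide) h, pvHas_mono (w := "member") (by decide) h]

theorem pv_eq_mcp (t : List Char) :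
    (pvHas "mcp server" t || (pvHas "mcp" t && pvHas "server" t)) = (pvHas "mcp" t && pvHas "server" t) := by
  cases h : pvHas "mcp server" t
  · simp
  · simp [pvHas_mono (w := "mcp") (by decide) h, pvHas_mono (w := "server") (by decide) h]

theorem pv_eq_lang (t : List Char) :
    (pvHas "language selection" t || (pvHas "language" t && (pvHas "change" t || pvHas "select" t)))
      = (pvHas "language" t && (pvHas "change" t || pvHas "select" t)) := by
  cases h : pvHas "language selection" t
  · simp
  · simp [pvHas_mono (w := "language") (by decide) h, pvHas_mono (w := "select") (by decide) h]

theorem pv_eq_ds (t : List Char) :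
    (pvHas "data source" t || pvHas "data sources" t) = pvHas "data source" t := by
  cases h : pvHas "data sources" t
  · simp
  · simp [pvHas_mono (w := "data source") (by decide) h]

theorem pv_eq_gidget (t : List Char) :
    (pvHas "gidget" t || pvHas "gidgets library" t) = pvHas "gidget" t := by
  cases h : pvHas "gidgets library" t
  · simp
  · simp [pvHas_mono (w := "gidget") (by decide) h]

-- proof-only helper: the rule table read as one flattened cascade over pvHas
def pvCasc (t : List Char) : List String :=
  if (pvHas "sign in" t || pvHas "signin" t || pvHas "login" t || pvHas "log in" t || pvHas "sign-in" t) && (pvHas "invalid" t || pvHas "error" t) then ["authentication", "signing-in", "error-cases"]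
    else if (pvHas "sign in" t || pvHas "signin" t || pvHas "login" t || pvHas "log in" t || pvHas "sign-in" t) && (pvHas "forgot password" t || pvHas "reset password" t || pvHas "change password" t) then ["authentication", "signing-in", "password-management"]
    else if pvHas "sign in" t || pvHas "signin" t || pvHas "login" t || pvHas "log in" t || pvHas "sign-in" t then ["authentication", "signing-in"]
    else if (pvHas "sign up" t || pvHas "signup" t || pvHas "register" t || pvHas "registration" t || pvHas "sign-up" t) && (pvHas "invalid" t || pvHas "error" t) then ["authentication", "signing-up", "error-cases"]
    else if pvHas "sign up" t || pvHas "signup" t || pvHas "register" t || pvHas "registration" t || pvHas "sign-up" t then ["authentication", "signing-up"]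
    else if pvHas "landing" t && pvHas "page" t then ["authentication", "landing-page"]
    else if pvHas "logout" t then ["authentication", "signing-in", "logout"]
    else if pvHas "create team" t || pvHas "create a team" t || pvHas "team creation" t then ["organizations", "create-team"]
    else if pvHas "profile" t && pvHas "member" t then ["organizations", "member-profile"]
    else if pvHas "organization settings" t || pvHas "org settings" t then ["organizations", "organization-settings"]
    else if pvHas "invite" t && pvHas "member" t then ["organizations", "invite-members"]
    else if pvHas "analytics" t then ["gidrs", "analytics"]
    else if pvHas "mcp" t && pvHas "server" t then ["gidrs", "mcp-server"]
    else if pvHas "language" t && (pvHas "change" t || pvHas "select" t) then ["gidrs", "language-selection"]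
    else if pvHas "create gidr" t then ["gidrs", "create-gidr"]
    else if pvHas "members" t && pvHas "gidr" t then ["gidrs", "members"]
    else if pvHas "gidr info" t || pvHas "info popup" t then ["gidr", "info", "gidr-info"]
    else if pvHas "general settings" t || pvHas "settings drawer" t then ["gidr", "info", "general-settings"]
    else if pvHas "prompt" t then ["gidr", "prompts"]
    else if pvHas "data source" t && pvHas "file" t then ["gidr", "ingestion-settings", "data-sources", "files"]
    else if pvHas "data source" t && pvHas "url" t then ["gidr", "ingestion-settings", "data-sources", "urls"]
    else if pvHas "data source" t && pvHas "connector" t then ["gidr", "ingestion-settings", "data-sources", "connectors"]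
    else if pvHas "data source" t && pvHas "database" t then ["gidr", "ingestion-settings", "data-sources", "database"]
    else if pvHas "data source" t then ["gidr", "ingestion-settings", "data-sources"]
    else if pvHas "file" t && (pvHas "upload" t || pvHas "ingest" t || pvHas "chunk" t) then ["gidr", "ingestion-settings", "data-sources", "files"]
    else if pvHas "url" t && (pvHas "add" t || pvHas "ingest" t) then ["gidr", "ingestion-settings", "data-sources", "urls"]
    else if pvHas "connector" t then ["gidr", "ingestion-settings", "data-sources", "connectors"]
    else if pvHas "database" t then ["gidr", "ingestion-settings", "data-sources", "database"]
    else if pvHas "tag" t then ["gidr", "ingestion-settings", "tags"]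
    else if pvHas "gidget" t then ["gidr", "design", "gidgets-library"]
    else if pvHas "studio" t then ["gidr", "design", "studio"]
    else if (pvHas "workflow" t || pvHas "work flow" t) && pvHas "node" t then ["gidr", "workflows", "nodes"]
    else if pvHas "workflow" t || pvHas "work flow" t then ["gidr", "workflows"]
    else if pvHas "node" t && (pvHas "react" t || pvHas "flow" t) then ["gidr", "workflows", "nodes"]
  else ["uncategorized"]

theorem pvScan_inner (s : List Char) (kws : List String) (fd : PySem.Set String) (w : String) :
    PySem.Set.contains (kws.foldl (fun fd kw =>
        if PySem.Set.contains fd kw then fd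
        else if PySem.Chars.startswith s kw.toList then PySem.Set.add fd kw
        else fd) fd) w
      = (PySem.Set.contains fd w || (kws.contains w && PySem.Chars.startswith s w.toList)) := by
  induction kws generalizing fd with
  | nil => simp
  | cons kw rest ih =>
    simp only [List.foldl_cons, ih]
    by_cases hw : w = kw
    · subst hw
      by_cases h1 : w ∈ fd
      · simp [PySem.Set.contains, h1]
      · by_cases h2 : PySem.Chars.startswith s w.toList
        · simp [PySem.Set.contains, h1, h2]
        · simp [PySem.Set.contains, h2]
    · have hstep : PySem.Set.contains
          (if PySem.Set.contains fd kw then fd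
           else if PySem.Chars.startswith s kw.toList then PySem.Set.add fd kw else fd) w
          = PySem.Set.contains fd w := by
        split_ifs with hg h2
        · rfl
        · simp [PySem.Set.contains, PySem.Set.mem_add, hw]
        · rfl
      rw [hstep]
      simp [hw]

theorem pvScan_outer (t : List Char) (L : List Int) (fd : PySem.Set String) (w : String) :
    PySem.Set.contains (L.foldl
      (fun found i => pvKeywords.foldl (fun fd kw =>
        if PySem.Set.contains fd kw then fd
        else if PySem.Chars.startswith (t.drop i.toNat) kw.toList then PySem.Set.add fd kw
        else fd) found) fd) w
    = (PySem.Set.contains fd w ||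
        L.any (fun i => pvKeywords.contains w && PySem.Chars.startswith (t.drop i.toNat) w.toList)) := by
  induction L generalizing fd with
  | nil => simp
  | cons i rest ih =>
    simp only [List.foldl_cons, ih, pvScan_inner, List.any_cons, Bool.or_assoc]

theorem pvScan_mem (t : List Char) (w : String) (hk : pvKeywords.contains w = true)
    (hne : w.toList ≠ []) :
    PySem.Set.contains (pvScan t) w = pvHas w t := by
  unfold pvScan
  rw [pvScan_outer]
  simp only [PySem.Set.empty, hk, Bool.true_and, List.contains_nil, Bool.false_or,
    PySem.Set.contains]
  rw [Bool.eq_iff_iff]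
  simp only [List.any_eq_true, PySem.List.mem_pyRange_one, pvHas,
    PySem.Chars.startswith_iff]
  constructor
  · rintro ⟨i, ⟨h0, hi⟩, hp⟩
    exact (PySem.Chars.exists_prefix_drop_iff_isIn _ _).mp ⟨i.toNat, hp⟩
  · intro h
    obtain ⟨j, hp⟩ := (PySem.Chars.exists_prefix_drop_iff_isIn w.toList t).mpr h
    by_cases hj : j < t.length
    · exact ⟨(j : Int), ⟨by positivity, by exact_mod_cast hj⟩, by simpa using hp⟩
    · exfalso
      rw [List.drop_eq_nil_of_le (by omega)] at hp
      exact hne (List.prefix_nil.mp hp)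

theorem pvEval_scan (t : List Char) : pvEval (pvScan t) pvRules = pvCasc t := by
  have hk0 : PySem.Set.contains (pvScan t) "sign in" = pvHas "sign in" t := pvScan_mem t "sign in" (by decide) (by decide)
  have hk1 : PySem.Set.contains (pvScan t) "signin" = pvHas "signin" t := pvScan_mem t "signin" (by decide) (by decide)
  have hk2 : PySem.Set.contains (pvScan t) "login" = pvHas "login" t := pvScan_mem t "login" (by decide) (by decide)
  have hk3 : PySem.Set.contains (pvScan t) "log in" = pvHas "log in" t := pvScan_mem t "log in" (by decide) (by decide)
  have hk4 : PySem.Set.contains (pvScan t) "sign-in" = pvHas "sign-in" t := pvScan_mem t "sign-in" (by decide) (by decide)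
  have hk5 : PySem.Set.contains (pvScan t) "invalid" = pvHas "invalid" t := pvScan_mem t "invalid" (by decide) (by decide)
  have hk6 : PySem.Set.contains (pvScan t) "error" = pvHas "error" t := pvScan_mem t "error" (by decide) (by decide)
  have hk7 : PySem.Set.contains (pvScan t) "forgot password" = pvHas "forgot password" t := pvScan_mem t "forgot password" (by decide) (by decide)
  have hk8 : PySem.Set.contains (pvScan t) "reset password" = pvHas "reset password" t := pvScan_mem t "reset password" (by decide) (by decide)
  have hk9 : PySem.Set.contains (pvScan t) "change password" = pvHas "change password" t := pvScan_mem t "change password" (by decide) (by decide)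
  have hk10 : PySem.Set.contains (pvScan t) "sign up" = pvHas "sign up" t := pvScan_mem t "sign up" (by decide) (by decide)
  have hk11 : PySem.Set.contains (pvScan t) "signup" = pvHas "signup" t := pvScan_mem t "signup" (by decide) (by decide)
  have hk12 : PySem.Set.contains (pvScan t) "register" = pvHas "register" t := pvScan_mem t "register" (by decide) (by decide)
  have hk13 : PySem.Set.contains (pvScan t) "registration" = pvHas "registration" t := pvScan_mem t "registration" (by decide) (by decide)
  have hk14 : PySem.Set.contains (pvScan t) "sign-up" = pvHas "sign-up" t := pvScan_mem t "sign-up" (by decide) (by decide)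
  have hk15 : PySem.Set.contains (pvScan t) "landing" = pvHas "landing" t := pvScan_mem t "landing" (by decide) (by decide)
  have hk16 : PySem.Set.contains (pvScan t) "page" = pvHas "page" t := pvScan_mem t "page" (by decide) (by decide)
  have hk17 : PySem.Set.contains (pvScan t) "logout" = pvHas "logout" t := pvScan_mem t "logout" (by decide) (by decide)
  have hk18 : PySem.Set.contains (pvScan t) "create team" = pvHas "create team" t := pvScan_mem t "create team" (by decide) (by decide)
  have hk19 : PySem.Set.contains (pvScan t) "create a team" = pvHas "create a team" t := pvScan_mem t "create a team" (by decide) (by decide)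
  have hk20 : PySem.Set.contains (pvScan t) "team creation" = pvHas "team creation" t := pvScan_mem t "team creation" (by decide) (by decide)
  have hk21 : PySem.Set.contains (pvScan t) "profile" = pvHas "profile" t := pvScan_mem t "profile" (by decide) (by decide)
  have hk22 : PySem.Set.contains (pvScan t) "member" = pvHas "member" t := pvScan_mem t "member" (by decide) (by decide)
  have hk23 : PySem.Set.contains (pvScan t) "organization settings" = pvHas "organization settings" t := pvScan_mem t "organization settings" (by decide) (by decide)
  have hk24 : PySem.Set.contains (pvScan t) "org settings" = pvHas "org settings" t := pvScan_mem t "org settings" (by decide) (by decide)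
  have hk25 : PySem.Set.contains (pvScan t) "invite" = pvHas "invite" t := pvScan_mem t "invite" (by decide) (by decide)
  have hk26 : PySem.Set.contains (pvScan t) "analytics" = pvHas "analytics" t := pvScan_mem t "analytics" (by decide) (by decide)
  have hk27 : PySem.Set.contains (pvScan t) "mcp" = pvHas "mcp" t := pvScan_mem t "mcp" (by decide) (by decide)
  have hk28 : PySem.Set.contains (pvScan t) "server" = pvHas "server" t := pvScan_mem t "server" (by decide) (by decide)
  have hk29 : PySem.Set.contains (pvScan t) "language" = pvHas "language" t := pvScan_mem t "language" (by decide) (by decide)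
  have hk30 : PySem.Set.contains (pvScan t) "change" = pvHas "change" t := pvScan_mem t "change" (by decide) (by decide)
  have hk31 : PySem.Set.contains (pvScan t) "select" = pvHas "select" t := pvScan_mem t "select" (by decide) (by decide)
  have hk32 : PySem.Set.contains (pvScan t) "create gidr" = pvHas "create gidr" t := pvScan_mem t "create gidr" (by decide) (by decide)
  have hk33 : PySem.Set.contains (pvScan t) "members" = pvHas "members" t := pvScan_mem t "members" (by decide) (by decide)
  have hk34 : PySem.Set.contains (pvScan t) "gidr" = pvHas "gidr" t := pvScan_mem t "gidr" (by decide) (by decide)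
  have hk35 : PySem.Set.contains (pvScan t) "gidr info" = pvHas "gidr info" t := pvScan_mem t "gidr info" (by decide) (by decide)
  have hk36 : PySem.Set.contains (pvScan t) "info popup" = pvHas "info popup" t := pvScan_mem t "info popup" (by decide) (by decide)
  have hk37 : PySem.Set.contains (pvScan t) "general settings" = pvHas "general settings" t := pvScan_mem t "general settings" (by decide) (by decide)
  have hk38 : PySem.Set.contains (pvScan t) "settings drawer" = pvHas "settings drawer" t := pvScan_mem t "settings drawer" (by decide) (by decide)
  have hk39 : PySem.Set.contains (pvScan t) "prompt" = pvHas "prompt" t := pvScan_mem t "prompt" (by decide) (by decide)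
  have hk40 : PySem.Set.contains (pvScan t) "data source" = pvHas "data source" t := pvScan_mem t "data source" (by decide) (by decide)
  have hk41 : PySem.Set.contains (pvScan t) "file" = pvHas "file" t := pvScan_mem t "file" (by decide) (by decide)
  have hk42 : PySem.Set.contains (pvScan t) "url" = pvHas "url" t := pvScan_mem t "url" (by decide) (by decide)
  have hk43 : PySem.Set.contains (pvScan t) "connector" = pvHas "connector" t := pvScan_mem t "connector" (by decide) (by decide)
  have hk44 : PySem.Set.contains (pvScan t) "database" = pvHas "database" t := pvScan_mem t "database" (by decide) (by decide)
  have hk45 : PySem.Set.contains (pvScan t) "upload" = pvHas "upload" t := pvScan_mem t "upload" (by decide) (by decide)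
  have hk46 : PySem.Set.contains (pvScan t) "ingest" = pvHas "ingest" t := pvScan_mem t "ingest" (by decide) (by decide)
  have hk47 : PySem.Set.contains (pvScan t) "chunk" = pvHas "chunk" t := pvScan_mem t "chunk" (by decide) (by decide)
  have hk48 : PySem.Set.contains (pvScan t) "add" = pvHas "add" t := pvScan_mem t "add" (by decide) (by decide)
  have hk49 : PySem.Set.contains (pvScan t) "tag" = pvHas "tag" t := pvScan_mem t "tag" (by decide) (by decide)
  have hk50 : PySem.Set.contains (pvScan t) "gidget" = pvHas "gidget" t := pvScan_mem t "gidget" (by decide) (by decide)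
  have hk51 : PySem.Set.contains (pvScan t) "studio" = pvHas "studio" t := pvScan_mem t "studio" (by decide) (by decide)
  have hk52 : PySem.Set.contains (pvScan t) "workflow" = pvHas "workflow" t := pvScan_mem t "workflow" (by decide) (by decide)
  have hk53 : PySem.Set.contains (pvScan t) "work flow" = pvHas "work flow" t := pvScan_mem t "work flow" (by decide) (by decide)
  have hk54 : PySem.Set.contains (pvScan t) "node" = pvHas "node" t := pvScan_mem t "node" (by decide) (by decide)
  have hk55 : PySem.Set.contains (pvScan t) "react" = pvHas "react" t := pvScan_mem t "react" (by decide) (by decide)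
  have hk56 : PySem.Set.contains (pvScan t) "flow" = pvHas "flow" t := pvScan_mem t "flow" (by decide) (by decide)
  simp only [pvRules, pvEval, List.all_cons, List.all_nil, List.any_cons, List.any_nil,
    Bool.or_false, Bool.and_true, hk0, hk1, hk2, hk3, hk4, hk5, hk6, hk7, hk8, hk9, hk10, hk11, hk12, hk13, hk14, hk15, hk16, hk17, hk18, hk19, hk20, hk21, hk22, hk23, hk24, hk25, hk26, hk27, hk28, hk29, hk30, hk31, hk32, hk33, hk34, hk35, hk36, hk37, hk38, hk39, hk40, hk41, hk42, hk43, hk44, hk45, hk46, hk47, hk48, hk49, hk50, hk51, hk52, hk53, hk54, hk55, hk56]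
  unfold pvCasc
  simp only [Bool.or_assoc]

set_option maxHeartbeats 4000000 in
theorem pvCat_eq (t : List Char) : pvCatA t = pvEval (pvScan t) pvRules := by
  rw [pvEval_scan]
  simp only [pvCatA,
    pv_eq_landing, pv_eq_profile, pv_eq_invite, pv_eq_mcp, pv_eq_lang, pv_eq_ds, pv_eq_gidget]
  cases _h1 : (pvHas "sign in" t || pvHas "signin" t || pvHas "login" t || pvHas "log in" t || pvHas "sign-in" t) with
  | true =>
    cases _h2 : (pvHas "invalid" t || pvHas "error" t) with
    | true =>
      simp [pvCasc, *]
    | false =>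
      cases _h3 : (pvHas "forgot password" t || pvHas "reset password" t || pvHas "change password" t) with
      | true =>
        simp [pvCasc, *]
      | false =>
        simp [pvCasc, *]
  | false =>
    cases _h4 : (pvHas "sign up" t || pvHas "signup" t || pvHas "register" t || pvHas "registration" t || pvHas "sign-up" t) with
    | true =>
      cases _h5 : (pvHas "invalid" t || pvHas "error" t) with
      | true =>
        simp [pvCasc, *]
      | false =>
        simp [pvCasc, *]
    | false =>
      cases _h6 : (pvHas "landing" t && pvHas "page" t) with
      | true =>
        simp [pvCasc, *]
      | false =>
        cases _h7 : (pvHas "logout" t) with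
        | true =>
          simp [pvCasc, *]
        | false =>
          cases _h8 : (pvHas "create team" t || pvHas "create a team" t || pvHas "team creation" t) with
          | true =>
            simp [pvCasc, *]
          | false =>
            cases _h9 : (pvHas "profile" t && pvHas "member" t) with
            | true =>
              simp [pvCasc, *]
            | false =>
              cases _h10 : (pvHas "organization settings" t || pvHas "org settings" t) with
              | true =>
                simp [pvCasc, *]
              | false =>
                cases _h11 : (pvHas "invite" t && pvHas "member" t) with
                | true =>
                  simp [pvCasc, *]
                | false =>
                  cases _h12 : (pvHas "analytics" t) with
                  | true =>
                    simp [pvCasc, *]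
                  | false =>
                    cases _h13 : (pvHas "mcp" t && pvHas "server" t) with
                    | true =>
                      simp [pvCasc, *]
                    | false =>
                      cases _h14 : (pvHas "language" t && (pvHas "change" t || pvHas "select" t)) with
                      | true =>
                        simp [pvCasc, *]
                      | false =>
                        cases _h15 : (pvHas "create gidr" t) with
                        | true =>
                          simp [pvCasc, *]
                        | false =>
                          cases _h16 : (pvHas "members" t && pvHas "gidr" t) with
                          | true =>
                            simp [pvCasc, *]
                          | false =>
                            cases _h17 : (pvHas "gidr info" t || pvHas "info popup" t) with
                            | true =>
                              simp [pvCasc, *]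
                            | false =>
                              cases _h18 : (pvHas "general settings" t || pvHas "settings drawer" t) with
                              | true =>
                                simp [pvCasc, *]
                              | false =>
                                cases _h19 : (pvHas "prompt" t) with
                                | true =>
                                  simp [pvCasc, *]
                                | false =>
                                  cases _h20 : (pvHas "data source" t) with
                                  | true =>
                                    cases _h21 : (pvHas "file" t) with
                                    | true =>
                                      simp [pvCasc, *]
                                    | false =>
                                      cases _h22 : (pvHas "url" t) with
                                      | true =>
                                        simp [pvCasc, *]
                                      | false =>
                                        cases _h23 : (pvHas "connector" t) with
                                        | true =>
                                          simp [pvCasc, *]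
                                        | false =>
                                          cases _h24 : (pvHas "database" t) with
                                          | true =>
                                            simp [pvCasc, *]
                                          | false =>
                                            simp [pvCasc, *]
                                  | false =>
                                    cases _h25 : (pvHas "file" t && (pvHas "upload" t || pvHas "ingest" t || pvHas "chunk" t)) with
                                    | true =>
                                      simp [pvCasc, *]
                                    | false =>
                                      cases _h26 : (pvHas "url" t && (pvHas "add" t || pvHas "ingest" t)) with
                                      | true =>
                                        simp [pvCasc, *]
                                      | false =>
                                        cases _h27 : (pvHas "connector" t) with
                                        | true =>
                                          simp [pvCasc, *]
                                        | false =>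
                                          cases _h28 : (pvHas "database" t) with
                                          | true =>
                                            simp [pvCasc, *]
                                          | false =>
                                            cases _h29 : (pvHas "tag" t) with
                                            | true =>
                                              simp [pvCasc, *]
                                            | false =>
                                              cases _h30 : (pvHas "gidget" t) with
                                              | true =>
                                                simp [pvCasc, *]
                                              | false =>
                                                cases _h31 : (pvHas "studio" t) with
                                                | true =>
                                                  simp [pvCasc, *]
                                                | false =>
                                                  cases _h32 : (pvHas "workflow" t || pvHas "work flow" t) with
                                                  | true =>
                                                    cases _h33 : (pvHas "node" t) with
                                                    | true =>
                                                      simp [pvCasc, *]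
                                                    | false =>
                                                      simp [pvCasc, *]
                                                  | false =>
                                                    cases _h34 : (pvHas "node" t && (pvHas "react" t || pvHas "flow" t)) with
                                                    | true =>
                                                      simp [pvCasc, *]
                                                    | false =>
                                                      simp [pvCasc, *]

-- ===== VERDICT (by name: the statement is the Claim_ definition above) =====
theorem categorize_testcase_spec : Claim_equal_categorize_testcase := by
  intro tc _
  unfold Spec_categorize_testcase categorize_testcase categorize_testcase_alt
  exact pvCat_eq (pvText tc)
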